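-- pv_equiv track=rewrite | github.com/tuzianna/pythoncode | computing principle/2048.py | pair_list
-- ===== SOURCE A (Python) =====
-- def pair_list(line):
--     """
--         merge the pair
--         """
--     paired_line = []
--
--     for dummy_i in range(0, len(line)-1):
--         if line[dummy_i] !=0 and line[dummy_i] == line[dummy_i+1]:
--             paired_line.append(2 * line[dummy_i])
--             paired_line.append(0)
--             break
--         else:
--             paired_line.append(line[dummy_i])
--     return paired_line
-- ===== SOURCE B (Python) =====
-- def pair_list(line):
--     """merge the pair"""
--     i = next((j for j in range(len(line) - 1)
--               if line[j] != 0 and line[j] == line[j + 1]), None)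
--     if i is not None:
--         return line[:i] + [2 * line[i], 0]
--     return line[:-1]
-- ===== Notes on version B (the rewrite author's own statement) =====
-- stated objective: simpler
-- what changed: B separates the search for the first adjacent nonzero equal pair from result construction by slicing (line[:i] + [2*line[i], 0], else line[:-1]) instead of appending element by element inside the loop.
import Mathlib
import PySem

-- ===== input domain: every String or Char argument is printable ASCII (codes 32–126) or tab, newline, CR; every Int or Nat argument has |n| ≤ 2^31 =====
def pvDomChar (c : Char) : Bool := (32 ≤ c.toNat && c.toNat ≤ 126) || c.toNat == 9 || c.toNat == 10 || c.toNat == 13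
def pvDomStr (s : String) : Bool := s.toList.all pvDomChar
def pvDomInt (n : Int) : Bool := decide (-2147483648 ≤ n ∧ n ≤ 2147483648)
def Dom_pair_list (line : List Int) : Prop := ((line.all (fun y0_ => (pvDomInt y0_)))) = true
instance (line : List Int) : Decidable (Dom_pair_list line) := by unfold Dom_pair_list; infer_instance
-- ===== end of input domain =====

-- B separates searching for the first adjacent nonzero equal pair from building the
-- result by slicing, instead of A's element-by-element append loop with break. (simpler)

-- ===== PORT A =====
-- A's loop over i in range(len-1), looking at line[i] and line[i+1], appending as it
-- goes and breaking at the first merge: transliterated as recursion over the list with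
-- a one-element lookahead (same elements visited in the same order, break = stop).
def pair_list (line : List Int) : List Int :=
  match line with
  | a :: b :: rest =>
      if a ≠ 0 ∧ a = b then [2 * a, 0]
      else a :: pair_list (b :: rest)
  | _ => []

-- ===== PORT B =====
-- index of the first j with line[j] ≠ 0 and line[j] = line[j+1] (the generator+next)
def pvFindPair (line : List Int) : Option Nat :=
  match line with
  | [] => none
  | [_] => none
  | a :: b :: rest =>
      if a ≠ 0 ∧ a = b then some 0
      else (pvFindPair (b :: rest)).map (· + 1)

def pair_list_alt (line : List Int) : List Int :=
  match pvFindPair line with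
  | some i => line.take i ++ [2 * line.getD i 0, 0]
  | none => line.dropLast

-- ===== PRECONDITION & SPEC =====
def Spec_pair_list (line : List Int) (out : List Int) : Prop := out = pair_list_alt line
instance (line : List Int) (out : List Int) : Decidable (Spec_pair_list line out) := by unfold Spec_pair_list; infer_instance

-- ===== CLAIM (what is proved, stated in full; the proofs are below) =====
def Claim_equal_pair_list : Prop := ∀ (line : List Int), Dom_pair_list line → Spec_pair_list line (pair_list line)

-- ===== LEMMAS AND PROOFS =====
theorem pair_list_eq_alt : ∀ (line : List Int), pair_list line = pair_list_alt line
  | [] => rfl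
  | [_] => rfl
  | a :: b :: rest => by
      by_cases h : a ≠ 0 ∧ a = b
      · obtain ⟨h1, h2⟩ := h
        subst h2
        simp [pair_list, pair_list_alt, pvFindPair, h1]
      · have ih := pair_list_eq_alt (b :: rest)
        simp only [pair_list, pair_list_alt, pvFindPair, if_neg h] at *
        cases hf : pvFindPair (b :: rest) with
        | none => simp [hf] at ih ⊢; simp [ih]
        | some j => simp [hf] at ih ⊢; simp [ih]

-- ===== VERDICT (by name: the statement is the Claim_ definition above) =====
theorem pair_list_spec : Claim_equal_pair_list := by
  intro line _
  unfold Spec_pair_list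
  exact pair_list_eq_alt line
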